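-- pv_equiv track=rewrite | github.com/BashithR/Traffic-Data-Processor-with-Tkintor | src/Task_A_B_C.py | peak_hour_vehicles_hanley_highway
-- ===== SOURCE A (Python) =====
-- def peak_hour_vehicles_hanley_highway(data):
--     """
--     Calculates the number of vehicles recorded in the peak (busiest) hour on Hanley Highway/Westway.
--     Returns the number of vehicles recorded in the peak (busiest) hour on Hanley Highway/Westway.
--     """
--     # Dictionary to store the number of vehicles per hour
--     hour_vehicle_count = {}
--
--     # Loop through each row to filter Hanley Highway/Westway vehicles and group by hour
--     for row in data:
--         if row['JunctionName'] == "Hanley Highway/Westway":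
--             hour = row['timeOfDay'].split(':')[0]  # Extract the hour from timeOfDay
--
--             # Increment vehicle count for the corresponding hour
--             if hour in hour_vehicle_count:
--                 hour_vehicle_count[hour] += 1
--             else:
--                 hour_vehicle_count[hour] = 1
--
--     # Find the hour with the maximum vehicles
--     if hour_vehicle_count:
--         peak_hour = max(hour_vehicle_count, key=hour_vehicle_count.get)
--         return hour_vehicle_count[peak_hour]  # Return the number of vehicles in the peak hour
--     else:
--         return 0  # If no data for Hanley Highway/Westway, return 0
-- ===== SOURCE B (Python) =====
-- def peak_hour_vehicles_hanley_highway(data):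
--     """
--     Calculates the number of vehicles recorded in the peak (busiest) hour on Hanley Highway/Westway.
--     Sort-then-scan: collect the hour of every matching row, sort, and return the
--     length of the longest run of equal hours (= the largest per-hour count).
--     """
--     hours = sorted(row['timeOfDay'].split(':')[0] for row in data
--                    if row['JunctionName'] == "Hanley Highway/Westway")
--     best = cur = 0
--     prev = None
--     for h in hours:
--         cur = cur + 1 if h == prev else 1
--         best = max(best, cur)
--         prev = h
--     return best
-- ===== Notes on version B (the rewrite author's own statement) =====
-- stated objective: alternative
-- what changed: replaces the per-hour hash-map counter plus key-argmax lookup with a sort of the filtered hour list followed by a single longest-run scan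
import Mathlib
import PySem

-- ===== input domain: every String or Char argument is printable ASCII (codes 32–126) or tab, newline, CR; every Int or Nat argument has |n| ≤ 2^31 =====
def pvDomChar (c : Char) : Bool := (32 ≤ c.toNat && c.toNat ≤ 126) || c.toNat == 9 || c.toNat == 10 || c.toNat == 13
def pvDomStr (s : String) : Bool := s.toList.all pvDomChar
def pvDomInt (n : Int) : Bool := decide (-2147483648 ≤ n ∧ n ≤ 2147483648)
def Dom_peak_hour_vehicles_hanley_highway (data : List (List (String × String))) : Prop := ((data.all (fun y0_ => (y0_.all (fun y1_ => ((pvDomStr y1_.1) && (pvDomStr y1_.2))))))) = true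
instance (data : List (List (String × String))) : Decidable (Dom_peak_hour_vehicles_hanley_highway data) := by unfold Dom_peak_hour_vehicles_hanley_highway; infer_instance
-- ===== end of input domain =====

-- B replaces A's per-hour hash-map counter + key-argmax with sort-then-longest-run scan; equal return values proved on Pre_ (rows carrying the keys A reads).

-- row[k] for a dict row modelled as an association list: FIRST matching pair.
-- Missing key = Python KeyError; excluded by Pre_, the port then falls back to "".
def pvRowGet (row : List (String × String)) (k : String) : String :=
  ((row.find? (fun p => p.1 == k)).map (·.2)).getD ""

-- t.split(':')[0]: split? is none only for sep = "" (here ":"), and split never returns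
-- an empty list, so both defaults are dead and [0] never raises.
def pvHour (t : String) : String :=
  ((PySem.Str.split? t ":").getD []).headD ""

-- ===== PORT A =====
def peak_hour_vehicles_hanley_highway (data : List (List (String × String))) : Int :=
  let d := data.foldl (fun d row =>
      if pvRowGet row "JunctionName" == "Hanley Highway/Westway" then
        let hour := pvHour (pvRowGet row "timeOfDay")
        -- 'hour_vehicle_count[hour] += 1' / 'hour_vehicle_count[hour] = 1' as dict assignment
        if d.contains hour then d.insert hour (d.getD hour 0 + 1)
        else d.insert hour 1
      else d)
    PySem.Dict.empty
  -- 'if hour_vehicle_count: … max(hour_vehicle_count, key=hour_vehicle_count.get) … else: return 0'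
  match PySem.List.max? d.keys (fun k => d.getD k 0) with
  | some peak => d.getD peak 0
  | none => 0

-- ===== PORT B =====
def pvStep (st : Int × Int × Option String) (h : String) : Int × Int × Option String :=
  let cur := if some h = st.2.2 then st.2.1 + 1 else 1
  (max st.1 cur, cur, some h)

def peak_hour_vehicles_hanley_highway_alt (data : List (List (String × String))) : Int :=
  let hours := ((data.filter (fun row => pvRowGet row "JunctionName" == "Hanley Highway/Westway")).map
      (fun row => pvHour (pvRowGet row "timeOfDay")))
  let sortedHours := PySem.List.sorted hours (fun x => x) false
  (sortedHours.foldl pvStep (0, 0, none)).1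

-- ===== PRECONDITION & SPEC =====
-- Pre_ excludes exactly the inputs on which Python A raises KeyError: every row must carry
-- 'JunctionName', and rows naming the Hanley junction must also carry 'timeOfDay'.
def Pre_peak_hour_vehicles_hanley_highway (data : List (List (String × String))) : Prop :=
  ∀ row ∈ data, (row.find? (fun p => p.1 == "JunctionName")).isSome = true ∧
    (pvRowGet row "JunctionName" = "Hanley Highway/Westway" →
      (row.find? (fun p => p.1 == "timeOfDay")).isSome = true)
instance (data : List (List (String × String))) : Decidable (Pre_peak_hour_vehicles_hanley_highway data) := by
  unfold Pre_peak_hour_vehicles_hanley_highway; infer_instance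

def pvWitness_peak_hour_vehicles_hanley_highway : (List (List (String × String))) :=
  [[("JunctionName", "Hanley Highway/Westway"), ("timeOfDay", "08:30")],
   [("JunctionName", "Elm Avenue/Rabbit Road")]]

def Spec_peak_hour_vehicles_hanley_highway (data : List (List (String × String))) (out : Int) : Prop := out = peak_hour_vehicles_hanley_highway_alt data
instance (data : List (List (String × String))) (out : Int) : Decidable (Spec_peak_hour_vehicles_hanley_highway data out) := by unfold Spec_peak_hour_vehicles_hanley_highway; infer_instance

-- ===== CLAIM (what is proved, stated in full; the proofs are below) =====
def Claim_equal_peak_hour_vehicles_hanley_highway : Prop := ∀ (data : List (List (String × String))), Dom_peak_hour_vehicles_hanley_highway data → Pre_peak_hour_vehicles_hanley_highway data → Spec_peak_hour_vehicles_hanley_highway data (peak_hour_vehicles_hanley_highway data)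

-- ===== LEMMAS AND PROOFS =====

-- the largest multiplicity of any element of l (0 for [])
def pvMaxCount (l : List String) : Int :=
  (l.map (fun v => (l.count v : Int))).foldl max 0

lemma pvMaxCount_nonneg (l : List String) : 0 ≤ pvMaxCount l :=
  (PySem.List.le_foldl_max _ 0).1

lemma pvCount_le_pvMaxCount {l : List String} {y : String} (hy : y ∈ l) :
    (l.count y : Int) ≤ pvMaxCount l :=
  (PySem.List.le_foldl_max _ 0).2 _ (List.mem_map.2 ⟨y, hy, rfl⟩)

lemma pvMaxCount_cases (l : List String) :
    pvMaxCount l = 0 ∨ ∃ v ∈ l, pvMaxCount l = (l.count v : Int) := by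
  rcases PySem.List.foldl_max_mem (l.map (fun v => (l.count v : Int))) 0 with h | h
  · exact Or.inl h
  · rcases List.mem_map.1 h with ⟨v, hv, he⟩
    exact Or.inr ⟨v, hv, he.symm⟩

lemma pvMaxCount_le {l : List String} {m : Int} (h0 : 0 ≤ m)
    (hc : ∀ v ∈ l, (l.count v : Int) ≤ m) : pvMaxCount l ≤ m := by
  rcases pvMaxCount_cases l with h | ⟨v, hv, h⟩
  · omega
  · rw [h]; exact hc v hv

lemma pvMaxCount_perm {l l' : List String} (h : l.Perm l') : pvMaxCount l = pvMaxCount l' := by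
  apply le_antisymm
  · apply pvMaxCount_le (pvMaxCount_nonneg l')
    intro v hv
    rw [h.count_eq]
    exact pvCount_le_pvMaxCount (h.mem_iff.1 hv)
  · apply pvMaxCount_le (pvMaxCount_nonneg l)
    intro v hv
    rw [← h.count_eq]
    exact pvCount_le_pvMaxCount (h.mem_iff.2 hv)

lemma pvMaxCount_replicate_append {x : String} {r : List String} (hx : x ∉ r) (c : Nat) :
    pvMaxCount (List.replicate c x ++ r) = max (c : Int) (pvMaxCount r) := by
  have hcx : (List.replicate c x ++ r).count x = c := by
    simp [List.count_append, List.count_replicate_self, List.count_eq_zero_of_not_mem hx]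
  have hcv : ∀ v, v ≠ x → (List.replicate c x ++ r).count v = r.count v := by
    intro v hvx
    simp [List.count_append, List.count_replicate, Ne.symm hvx]
  apply le_antisymm
  · apply pvMaxCount_le (le_max_of_le_right (pvMaxCount_nonneg r))
    intro v hv
    by_cases hvx : v = x
    · subst hvx
      rw [hcx]; exact le_max_left _ _
    · have hvr : v ∈ r := by
        rcases List.mem_append.1 hv with h | h
        · exact absurd (List.eq_of_mem_replicate h) hvx
        · exact h
      rw [hcv v hvx]
      exact le_max_of_le_right (pvCount_le_pvMaxCount hvr)
  · apply max_le
    · by_cases hc : c = 0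
      · subst hc; simpa using pvMaxCount_nonneg (List.replicate 0 x ++ r)
      · have hxl : x ∈ List.replicate c x ++ r :=
          List.mem_append.2 (Or.inl (List.mem_replicate.2 ⟨hc, rfl⟩))
        have := pvCount_le_pvMaxCount hxl
        rwa [hcx] at this
    · rcases pvMaxCount_cases r with h | ⟨v, hv, h⟩
      · rw [h]; exact pvMaxCount_nonneg _
      · rw [h]
        have hvx : v ≠ x := fun he => hx (he ▸ hv)
        have : ((List.replicate c x ++ r).count v : Int) ≤ pvMaxCount (List.replicate c x ++ r) :=
          pvCount_le_pvMaxCount (List.mem_append.2 (Or.inr hv))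
        rwa [hcv v hvx] at this

-- the run-length scan over a ≤-sorted list, with a ghost prefix of c copies of a already consumed
lemma pvScan (t : List String) : ∀ (a : String) (c : Nat) (b : Int), (c : Int) ≤ b →
    (List.replicate c a ++ t).Pairwise (· ≤ ·) →
    (t.foldl pvStep (b, (c : Int), some a)).1 = max b (pvMaxCount (List.replicate c a ++ t)) := by
  induction t with
  | nil =>
    intro a c b hcb _
    have hM : pvMaxCount (List.replicate c a ++ ([] : List String)) ≤ (c : Int) := by
      apply pvMaxCount_le (Int.natCast_nonneg c)
      intro v hv
      rw [List.append_nil, List.count_replicate]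
      split <;> simp
    have h0 : 0 ≤ pvMaxCount (List.replicate c a ++ ([] : List String)) := pvMaxCount_nonneg _
    simp only [List.foldl_nil]
    omega
  | cons h t' ih =>
    intro a c b hcb hp
    by_cases hha : h = a
    · subst hha
      have hstep : pvStep (b, (c : Int), some h) h = (max b ((c : Int) + 1), (c : Int) + 1, some h) := by
        simp [pvStep]
      have hlist : List.replicate c h ++ h :: t' = List.replicate (c + 1) h ++ t' := by
        rw [List.replicate_succ']; simp
      rw [List.foldl_cons, hstep]
      have hcast : ((c : Int) + 1) = ((c + 1 : Nat) : Int) := by push_cast; ring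
      rw [hcast]
      rw [ih h (c + 1) (max b ((c + 1 : Nat) : Int)) (le_max_right _ _) (by rw [← hlist]; exact hp)]
      rw [hlist]
      have hmem : h ∈ List.replicate (c + 1) h ++ t' :=
        List.mem_append.2 (Or.inl (List.mem_replicate.2 ⟨Nat.succ_ne_zero c, rfl⟩))
      have hM : ((c : Int) + 1) ≤ pvMaxCount (List.replicate (c + 1) h ++ t') := by
        have := pvCount_le_pvMaxCount hmem
        rw [List.count_append, List.count_replicate_self] at this
        push_cast at this ⊢
        omega
      push_cast
      omega
    · have hstep : pvStep (b, (c : Int), some a) h = (max b 1, 1, some h) := by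
        simp [pvStep, hha]
      have hsub : (h :: t').Sublist (List.replicate c a ++ h :: t') := List.sublist_append_right _ _
      have hp' : (h :: t').Pairwise (· ≤ ·) := hp.sublist hsub
      have hYge : (1 : Int) ≤ pvMaxCount (h :: t') := by
        have := pvCount_le_pvMaxCount (List.mem_cons_self (l := t') (a := h))
        have hc1 : 1 ≤ (h :: t').count h := List.count_pos_iff.2 (List.mem_cons_self)
        omega
      have hone : List.replicate 1 h ++ t' = h :: t' := by simp
      rw [List.foldl_cons, hstep]
      have := ih h 1 (max b 1) (by simp) (by rw [hone]; exact hp')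
      norm_num at this
      rw [this]
      by_cases hc : c = 0
      · subst hc
        simp only [List.replicate_zero, List.nil_append]
        omega
      · -- c ≥ 1: a precedes h in the sorted list, so a < h ≤ every element of t' and a ∉ h :: t'
        have hax : ∀ y ∈ h :: t', a ≤ y := by
          intro y hy
          have := (List.pairwise_append.1 hp).2.2
          exact this a (List.mem_replicate.2 ⟨hc, rfl⟩) y hy
        have hnotmem : a ∉ h :: t' := by
          intro hmem
          rcases List.mem_cons.1 hmem with he | hmem'
          · exact hha he.symm
          · have h1 : a ≤ h := hax h (List.mem_cons_self)
            have h2 : h ≤ a := List.rel_of_pairwise_cons hp' hmem'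
            exact hha (le_antisymm h2 h1)
        rw [pvMaxCount_replicate_append hnotmem c]
        omega

-- the dict-building step of A is the Counter step
lemma pvStepA_eq (d : PySem.Dict String Int) (h : String) :
    (if d.contains h then d.insert h (d.getD h 0 + 1) else d.insert h 1) =
      d.insert h (d.getD h 0 + 1) := by
  by_cases hc : d.contains h = true
  · rw [if_pos hc]
  · rw [if_neg hc, PySem.Dict.getD_of_not_contains d 0 (by simpa using hc), zero_add]

-- A's loop builds Counter(hours)
lemma pvDictA_eq (data : List (List (String × String))) :
    (data.foldl (fun d row =>
      if pvRowGet row "JunctionName" == "Hanley Highway/Westway" then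
        (if d.contains (pvHour (pvRowGet row "timeOfDay")) then
          d.insert (pvHour (pvRowGet row "timeOfDay")) (d.getD (pvHour (pvRowGet row "timeOfDay")) 0 + 1)
        else d.insert (pvHour (pvRowGet row "timeOfDay")) 1)
      else d) PySem.Dict.empty) =
    PySem.Dict.counter ((data.filter (fun row => pvRowGet row "JunctionName" == "Hanley Highway/Westway")).map
      (fun row => pvHour (pvRowGet row "timeOfDay"))) := by
  have hfg : ∀ (acc : PySem.Dict String Int), ∀ row ∈ data,
      (fun (d : PySem.Dict String Int) row =>
        if pvRowGet row "JunctionName" == "Hanley Highway/Westway" then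
          (if d.contains (pvHour (pvRowGet row "timeOfDay")) then
            d.insert (pvHour (pvRowGet row "timeOfDay")) (d.getD (pvHour (pvRowGet row "timeOfDay")) 0 + 1)
          else d.insert (pvHour (pvRowGet row "timeOfDay")) 1)
        else d) acc row =
      (fun (d : PySem.Dict String Int) row =>
        if pvRowGet row "JunctionName" == "Hanley Highway/Westway" then
          d.insert (pvHour (pvRowGet row "timeOfDay")) (d.getD (pvHour (pvRowGet row "timeOfDay")) 0 + 1)
        else d) acc row := by
    intro acc row _
    simp only []
    by_cases hx : (pvRowGet row "JunctionName" == "Hanley Highway/Westway") = true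
    · rw [if_pos hx, if_pos hx, pvStepA_eq]
    · rw [if_neg hx, if_neg hx]
  rw [PySem.List.foldl_congr_mem _ _ _ _ hfg]
  rw [PySem.List.foldl_if_eq_foldl_filter]
  rw [← List.foldl_map (f := fun row => pvHour (pvRowGet row "timeOfDay"))
      (g := fun (d : PySem.Dict String Int) x => d.insert x (d.getD x 0 + 1))]
  exact PySem.Dict.foldl_insert_getD_add_one_eq_counter _

-- A's value is the largest multiplicity in the hour list
lemma pvA_eq_maxCount (hours : List String) :
    (match PySem.List.max? (PySem.Dict.counter hours).keys (fun k => (PySem.Dict.counter hours).getD k 0) with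
      | some peak => (PySem.Dict.counter hours).getD peak 0
      | none => (0 : Int)) = pvMaxCount hours := by
  have hkey : (fun k => (PySem.Dict.counter hours).getD k 0) = fun k => ((hours.count k : Int)) := by
    funext k; exact PySem.Dict.getD_counter hours k
  rw [PySem.Dict.keys_counter, hkey]
  cases hmax : PySem.List.max? (PySem.Set.ofList hours) (fun k => ((hours.count k : Int))) with
  | none =>
    have hnil := (PySem.List.max?_eq_none_iff _ _).1 hmax
    have : hours = [] := by
      cases hh : hours with
      | nil => rfl
      | cons x t =>
        exfalso
        have : x ∈ PySem.Set.ofList hours := (PySem.Set.mem_ofList _ _).2 (by rw [hh]; exact List.mem_cons_self)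
        rw [hnil] at this
        exact absurd this (List.not_mem_nil)
    subst this
    rfl
  | some peak =>
    have hpm : peak ∈ hours := (PySem.Set.mem_ofList _ _).1 (PySem.List.max?_mem hmax)
    apply le_antisymm
    · exact pvCount_le_pvMaxCount hpm
    · apply pvMaxCount_le (Int.natCast_nonneg _)
      intro v hv
      exact PySem.List.max?_isMax hmax v ((PySem.Set.mem_ofList _ _).2 hv)

-- B's scan over the sorted hour list is the largest multiplicity
lemma pvB_eq_maxCount (hours : List String) :
    ((PySem.List.sorted hours (fun x => x) false).foldl pvStep (0, 0, none)).1 = pvMaxCount hours := by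
  have hperm := PySem.List.sorted_perm hours (fun x => x) false
  rw [← pvMaxCount_perm hperm]
  have hpw : (PySem.List.sorted hours (fun x => x) false).Pairwise (· ≤ ·) := by
    have := PySem.List.sorted_pairwise hours (fun x => x)
    simpa using this
  cases hs : PySem.List.sorted hours (fun x => x) false with
  | nil => rfl
  | cons h t =>
    rw [hs] at hpw
    have hstep : pvStep (0, 0, none) h = (1, 1, some h) := by simp [pvStep]
    rw [List.foldl_cons, hstep]
    have hone : List.replicate 1 h ++ t = h :: t := by simp
    have := pvScan t h 1 1 (by simp) (by rw [hone]; exact hpw)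
    norm_num at this
    rw [this]
    have hYge : (1 : Int) ≤ pvMaxCount (h :: t) := by
      have := pvCount_le_pvMaxCount (List.mem_cons_self (l := t) (a := h))
      have hc1 : 1 ≤ (h :: t).count h := List.count_pos_iff.2 (List.mem_cons_self)
      omega
    omega

-- ===== VERDICT (by name: the statement is the Claim_ definition above) =====
theorem peak_hour_vehicles_hanley_highway_spec : Claim_equal_peak_hour_vehicles_hanley_highway := by
  intro data _ _
  unfold Spec_peak_hour_vehicles_hanley_highway
  unfold peak_hour_vehicles_hanley_highway peak_hour_vehicles_hanley_highway_alt
  simp only [pvDictA_eq, pvA_eq_maxCount, pvB_eq_maxCount]
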